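-- pv_equiv track=rewrite | github.com/zacharydenton/boko | scripts/sync_symbols.py | generate_rust_additions
-- ===== SOURCE A (Python) =====
-- from collections import defaultdict
-- from typing import Dict, List, Tuple, Optional, Set
--
-- def css_name_to_rust_const(css_name: str) -> str:
--     """Convert CSS property name to Rust constant name."""
--     # Remove -kfx- and -webkit- prefixes
--     name = css_name.lstrip('-')
--     if name.startswith('kfx-'):
--         name = name[4:]
--     if name.startswith('webkit-'):
--         name = name[7:]
--     if name.startswith('amzn-'):
--         name = name[5:]
--
--     # Convert to UPPER_SNAKE_CASE
--     name = name.replace('-', '_').upper()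
--
--     return name
--
-- def generate_rust_additions(missing: List[Tuple[int, str]]) -> str:
--     """Generate Rust constant definitions for missing symbols."""
--
--     lines = ["// Generated symbol additions from yj_to_epub_properties.py", ""]
--
--     # Group by category
--     by_category = defaultdict(list)
--     for symbol_id, description in missing:
--         if 'unit:' in description:
--             by_category['units'].append((symbol_id, description))
--         elif ':' in description:
--             # Value symbol
--             prop_name = description.split(':')[0].strip()
--             by_category[f'values_{prop_name}'].append((symbol_id, description))
--         else:
--             by_category['properties'].append((symbol_id, description))
--
--     for category, items in sorted(by_category.items()):
--         lines.append(f"// {category.replace('_', ' ').title()}")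
--         for symbol_id, description in sorted(items):
--             const_name = css_name_to_rust_const(description.split(':')[0] if ':' in description else description)
--             lines.append(f"pub const {const_name}: u64 = {symbol_id}; // ${symbol_id} - {description}")
--         lines.append("")
--
--     return '\n'.join(lines)
-- ===== SOURCE B (Python) =====
-- def css_name_to_rust_const(css_name: str) -> str:
--     """Convert CSS property name to Rust constant name."""
--     name = css_name.lstrip('-')
--     if name.startswith('kfx-'):
--         name = name[4:]
--     if name.startswith('webkit-'):
--         name = name[7:]
--     if name.startswith('amzn-'):
--         name = name[5:]
--     return name.replace('-', '_').upper()
--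
-- def _category(description: str) -> str:
--     if 'unit:' in description:
--         return 'units'
--     if ':' in description:
--         return 'values_' + description.split(':')[0].strip()
--     return 'properties'
--
-- def generate_rust_additions(missing):
--     """Generate Rust constant definitions for missing symbols."""
--     lines = ["// Generated symbol additions from yj_to_epub_properties.py", ""]
--     for cat in sorted({_category(d) for _, d in missing}):
--         lines.append("// " + cat.replace('_', ' ').title())
--         for symbol_id, description in sorted(p for p in missing if _category(p[1]) == cat):
--             const_name = css_name_to_rust_const(description.split(':')[0] if ':' in description else description)
--             lines.append(f"pub const {const_name}: u64 = {symbol_id}; // ${symbol_id} - {description}")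
--         lines.append("")
--     return '\n'.join(lines)
-- ===== Notes on version B (the rewrite author's own statement) =====
-- stated objective: alternative
-- what changed: Replaces the defaultdict bucket-building pass with no dict at all: B computes the sorted set of category labels and, for each category, filters and sorts the matching items directly.
import Mathlib
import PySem

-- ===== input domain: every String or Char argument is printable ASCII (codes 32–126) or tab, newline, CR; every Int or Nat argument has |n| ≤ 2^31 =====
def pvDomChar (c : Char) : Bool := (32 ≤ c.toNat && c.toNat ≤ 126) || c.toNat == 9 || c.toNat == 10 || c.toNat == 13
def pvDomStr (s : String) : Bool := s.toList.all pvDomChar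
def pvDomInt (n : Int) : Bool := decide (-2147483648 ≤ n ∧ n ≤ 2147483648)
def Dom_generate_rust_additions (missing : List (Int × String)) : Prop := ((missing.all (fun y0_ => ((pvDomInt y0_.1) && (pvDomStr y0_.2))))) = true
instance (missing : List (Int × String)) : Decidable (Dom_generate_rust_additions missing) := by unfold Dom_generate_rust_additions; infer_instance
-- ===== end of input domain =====

-- B replaces A's defaultdict bucket-building pass by a sorted set of category labels with one filter-and-sort pass per category; equal output, no dict.
-- Equivalence is about the return value only (neither program mutates its argument).

-- ===== PORT A =====

-- hand port of str.title(): a letter is uppercased after a non-letter, lowercased otherwise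
-- (exact on the ASCII domain, where Python's "cased" characters are exactly the letters)
def pyTitle : List Char → Bool → List Char
  | [], _ => []
  | c :: rest, prevAlpha =>
    if PySem.Chars.isalpha c then
      (if prevAlpha then PySem.Chars.lowerChar c else PySem.Chars.upperChar c) :: pyTitle rest true
    else c :: pyTitle rest false

-- css_name_to_rust_const, over List Char; .lstrip('-') is dropWhile (· == '-') (exact: drops leading '-' only)
def rustConst (css_name : List Char) : List Char :=
  let name := css_name.dropWhile (· == '-')
  let name := if PySem.Chars.startswith name ("kfx-".toList) then PySem.List.slice name (some 4) none else name
  let name := if PySem.Chars.startswith name ("webkit-".toList) then PySem.List.slice name (some 7) none else name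
  let name := if PySem.Chars.startswith name ("amzn-".toList) then PySem.List.slice name (some 5) none else name
  PySem.Chars.upper (PySem.Chars.replace name ['-'] ['_'])

-- the f"pub const …" line for one (symbol_id, description) item (shared literally by both Pythons)
def lineFor (p : Int × String) : List Char :=
  let desc := p.2.toList
  let base := if PySem.Chars.isIn [':'] desc then (PySem.Chars.splitOn desc [':']).headD [] else desc
  "pub const ".toList ++ rustConst base ++ ": u64 = ".toList ++ (PySem.Int.toStr p.1).toList
    ++ "; // $".toList ++ (PySem.Int.toStr p.1).toList ++ " - ".toList ++ desc

def headerFor (cat : List Char) : List Char :=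
  "// ".toList ++ pyTitle (PySem.Chars.replace cat ['_'] [' ']) false

def generate_rust_additions (missing : List (Int × String)) : String :=
  let lines : List (List Char) := ["// Generated symbol additions from yj_to_epub_properties.py".toList, []]
  let by_category := missing.foldl (fun d p =>
      let desc := p.2.toList
      if PySem.Chars.isIn ("unit:".toList) desc then d.modify ("units".toList) [] (· ++ [p])
      else if PySem.Chars.isIn [':'] desc then
        let prop_name := PySem.Chars.strip ((PySem.Chars.splitOn desc [':']).headD [])
        d.modify ("values_".toList ++ prop_name) [] (· ++ [p])
      else d.modify ("properties".toList) [] (· ++ [p]))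
    (PySem.Dict.empty : PySem.Dict (List Char) (List (Int × String)))
  -- sorted(by_category.items()): dict keys are distinct, so Python's tuple comparison is decided by the key alone — sorting by .1 is exact here
  let sortedItems := PySem.List.sorted by_category.items (fun q => q.1) false
  let lines := sortedItems.foldl (fun acc q =>
      let acc := acc ++ [headerFor q.1]
      let acc := (PySem.List.sorted2 q.2 (fun p => p.1) (fun p => p.2) false).foldl
        (fun acc2 p => acc2 ++ [lineFor p]) acc
      acc ++ [[]]) lines
  String.ofList (PySem.Chars.join ['\n'] lines)

-- ===== PORT B =====

-- B's _category helper
def catOf (description : List Char) : List Char :=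
  if PySem.Chars.isIn ("unit:".toList) description then "units".toList
  else if PySem.Chars.isIn [':'] description then
    "values_".toList ++ PySem.Chars.strip ((PySem.Chars.splitOn description [':']).headD [])
  else "properties".toList

def generate_rust_additions_alt (missing : List (Int × String)) : String :=
  let lines : List (List Char) := ["// Generated symbol additions from yj_to_epub_properties.py".toList, []]
  let cats := PySem.List.sorted (PySem.Set.ofList (missing.map (fun p => catOf p.2.toList))) (fun c => c) false
  let lines := cats.foldl (fun acc c =>
      let acc := acc ++ [headerFor c]
      let acc := (PySem.List.sorted2 (missing.filter (fun p => catOf p.2.toList == c)) (fun p => p.1) (fun p => p.2) false).foldl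
        (fun acc2 p => acc2 ++ [lineFor p]) acc
      acc ++ [[]]) lines
  String.ofList (PySem.Chars.join ['\n'] lines)

-- ===== PRECONDITION & SPEC =====
def Spec_generate_rust_additions (missing : List (Int × String)) (out : String) : Prop := out = generate_rust_additions_alt missing
instance (missing : List (Int × String)) (out : String) : Decidable (Spec_generate_rust_additions missing out) := by unfold Spec_generate_rust_additions; infer_instance

-- ===== CLAIM (what is proved, stated in full; the proofs are below) =====
def Claim_equal_generate_rust_additions : Prop := ∀ (missing : List (Int × String)), Dom_generate_rust_additions missing → Spec_generate_rust_additions missing (generate_rust_additions missing)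

-- ===== LEMMAS AND PROOFS =====

-- insertBy commutes with map when the comparison is read through the map
theorem insertBy_map {β α : Type} (before : α → α → Bool) (f : β → α) (x : β) (ys : List β) :
    PySem.List.insertBy before (f x) (ys.map f) =
      (PySem.List.insertBy (fun a b => before (f a) (f b)) x ys).map f := by
  induction ys with
  | nil => simp [PySem.List.insertBy]
  | cons y t ih =>
    simp only [List.map_cons, PySem.List.insertBy]
    by_cases h : before (f x) (f y) = true
    · simp [h]
    · simp [h, ih]

-- sorting a mapped list by a key = mapping the list sorted by the composed key
theorem sorted_map {β α κ : Type} [LT κ] [DecidableLT κ] (f : β → α) (key : α → κ) (xs : List β) :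
    PySem.List.sorted (xs.map f) key false =
      (PySem.List.sorted xs (fun x => key (f x)) false).map f := by
  rw [PySem.List.sorted_eq_foldl_insertBy, PySem.List.sorted_eq_foldl_insertBy, List.foldl_map]
  suffices h : ∀ (acc : List α) (bcc : List β), acc = bcc.map f →
      xs.foldl (fun acc x => PySem.List.insertBy (fun a b => decide (key a < key b)) (f x) acc) acc =
      (xs.foldl (fun acc x => PySem.List.insertBy (fun a b => decide (key (f a) < key (f b))) x acc) bcc).map f by
    exact h [] [] rfl
  induction xs with
  | nil => intro acc bcc h; simpa using h
  | cons x t ih =>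
    intro acc bcc h
    subst h
    simp only [List.foldl_cons]
    exact ih _ _ (insertBy_map _ f x bcc)

-- A's grouping loop writes to the key catOf(description)
theorem abody_eq :
    (fun (d : PySem.Dict (List Char) (List (Int × String))) (p : Int × String) =>
      let desc := p.2.toList
      if PySem.Chars.isIn ("unit:".toList) desc then d.modify ("units".toList) [] (· ++ [p])
      else if PySem.Chars.isIn [':'] desc then
        let prop_name := PySem.Chars.strip ((PySem.Chars.splitOn desc [':']).headD [])
        d.modify ("values_".toList ++ prop_name) [] (· ++ [p])
      else d.modify ("properties".toList) [] (· ++ [p]))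
    = fun d p => d.modify (catOf p.2.toList) [] (· ++ [p]) := by
  funext d p
  simp only [catOf]
  split_ifs <;> rfl

theorem gra_spec_aux (missing : List (Int × String)) :
    generate_rust_additions missing = generate_rust_additions_alt missing := by
  simp only [generate_rust_additions, generate_rust_additions_alt, abody_eq]
  have hget : ∀ c, (missing.foldl (fun d p => d.modify (catOf p.2.toList) [] (· ++ [p]))
      (PySem.Dict.empty : PySem.Dict (List Char) (List (Int × String)))).getD c []
      = missing.filter (fun p => catOf p.2.toList == c) := by
    intro c
    have h := PySem.Dict.getD_foldl_modify_append
      (missing.map (fun p => (catOf p.2.toList, p)))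
      (PySem.Dict.empty : PySem.Dict (List Char) (List (Int × String))) c
    rw [List.foldl_map] at h
    simpa [List.filter_map, Function.comp_def] using h
  have hnodup : (missing.foldl (fun d p => d.modify (catOf p.2.toList) [] (· ++ [p]))
      (PySem.Dict.empty : PySem.Dict (List Char) (List (Int × String)))).keys.Nodup :=
    PySem.Dict.nodup_keys_foldl_modify_key missing (fun p => catOf p.2.toList) []
      (fun _ p l => l ++ [p]) _ (by simp)
  have hkeys : (missing.foldl (fun d p => d.modify (catOf p.2.toList) [] (· ++ [p]))
      (PySem.Dict.empty : PySem.Dict (List Char) (List (Int × String)))).keys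
      = PySem.Set.ofList (missing.map (fun p => catOf p.2.toList)) := by
    have h := PySem.Dict.keys_foldl_modify_key missing (fun p => catOf p.2.toList) []
      (fun _ p l => l ++ [p])
      (PySem.Dict.empty : PySem.Dict (List Char) (List (Int × String)))
    simpa [PySem.Set.update_nil_left] using h
  rw [PySem.Dict.items_eq_map_keys _ hnodup [], hkeys, sorted_map, List.foldl_map]
  dsimp only
  simp only [hget]

-- ===== VERDICT (by name: the statement is the Claim_ definition above) =====
theorem generate_rust_additions_spec : Claim_equal_generate_rust_additions := by
  intro missing _
  exact gra_spec_aux missing
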